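-- pv_equiv track=rewrite | github.com/spullara/ComfyUI-Gallery | folder_monitor.py | detect_folder_changes
-- ===== SOURCE A (Python) =====
-- def detect_folder_changes(old_folders, new_folders):
--     """Detects changes between two folder data dictionaries."""
--     changes = {"folders": {}}
--
--     all_folders = set(old_folders.keys()) | set(new_folders.keys())
--     for folder_name in all_folders:
--         old_folder = old_folders.get(folder_name, {})
--         new_folder = new_folders.get(folder_name, {})
--         folder_changes = {}
--
--         old_files = set(old_folder.keys())
--         new_files = set(new_folder.keys())
--         all_files = old_files | new_files
--
--         for filename in all_files:
--             old_file_data = old_folder.get(filename)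
--             new_file_data = new_folder.get(filename)
--
--             if filename not in old_folder: # New file
--                 folder_changes[filename] = {"action": "create", **new_file_data}
--             elif filename not in new_folder: # Removed file
--                 folder_changes[filename] = {"action": "remove"}
--             elif old_file_data != new_file_data: # Updated file (simplistic comparison)
--                 folder_changes[filename] = {"action": "update", **new_file_data}
--
--         if folder_changes:
--             changes["folders"][folder_name] = folder_changes
--
--     return changes
-- ===== SOURCE B (Python) =====
-- def detect_folder_changes(old_folders, new_folders):
--     """Diffs two nested folder dicts without building key-union sets:
--     one pass over old folders (remove/update per old file, then creates for
--     that folder's new files) and one pass over new folders emitting whole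
--     new folders as creates."""
--
--     def diff_files(old, new):
--         fc = {}
--         for f, od in old.items():
--             nd = new.get(f)
--             if nd is None:
--                 fc[f] = {"action": "remove"}
--             elif od != nd:
--                 fc[f] = {"action": "update", **nd}
--         for f, nd in new.items():
--             if f not in old:
--                 fc[f] = {"action": "create", **nd}
--         return fc
--
--     folders = {}
--     for name, old in old_folders.items():
--         fc = diff_files(old, new_folders.get(name, {}))
--         if fc:
--             folders[name] = fc
--     for name, new in new_folders.items():
--         if new and name not in old_folders:
--             folders[name] = {f: {"action": "create", **nd} for f, nd in new.items()}
--     return {"folders": folders}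
-- ===== Notes on version B (the rewrite author's own statement) =====
-- stated objective: simpler
-- what changed: B drops A's three key-union set constructions and per-file three-way membership dispatch: it makes one pass over old folders (emitting remove/update per old file, then creates for that folder's new files) and one pass over new folders emitting whole new folders as creates.
import Mathlib
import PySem

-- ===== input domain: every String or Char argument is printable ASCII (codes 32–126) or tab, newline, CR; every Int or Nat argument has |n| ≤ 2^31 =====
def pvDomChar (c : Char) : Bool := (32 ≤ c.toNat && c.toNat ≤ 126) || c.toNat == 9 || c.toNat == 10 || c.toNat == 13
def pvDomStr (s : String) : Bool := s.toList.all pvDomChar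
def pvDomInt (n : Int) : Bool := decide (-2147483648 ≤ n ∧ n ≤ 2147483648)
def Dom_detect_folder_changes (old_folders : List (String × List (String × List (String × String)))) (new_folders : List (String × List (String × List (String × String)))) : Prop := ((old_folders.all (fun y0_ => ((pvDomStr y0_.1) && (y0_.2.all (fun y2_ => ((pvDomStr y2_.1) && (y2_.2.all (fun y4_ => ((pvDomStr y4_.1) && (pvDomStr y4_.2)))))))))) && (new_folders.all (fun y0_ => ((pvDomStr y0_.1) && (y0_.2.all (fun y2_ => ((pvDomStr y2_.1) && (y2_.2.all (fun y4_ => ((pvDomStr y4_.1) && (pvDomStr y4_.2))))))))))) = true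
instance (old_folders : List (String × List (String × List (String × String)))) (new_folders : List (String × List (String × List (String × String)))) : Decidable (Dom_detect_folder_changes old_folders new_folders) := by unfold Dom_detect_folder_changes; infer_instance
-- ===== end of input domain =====

-- B replaces A's key-union sets and three-way per-file dispatch by one pass over the old
-- folders and one pass over the new folders (objective: simpler; same asymptotic cost).

-- Shared Python-semantics helpers (used by both ports):
-- Python's '==' on two dicts (order-insensitive: same key set, same value per key)
def pyDictEq (a b : List (String × String)) : Bool :=
  PySem.Set.equal (PySem.Set.ofList (a.map Prod.fst)) (PySem.Set.ofList (b.map Prod.fst)) &&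
  a.all (fun p => (PySem.Dict.mk a).get? p.1 == (PySem.Dict.mk b).get? p.1)

-- the Python dict literal {"action": tag, **d} (a key "action" in d overwrites in place)
def pyActionMerge (tag : String) (d : List (String × String)) : List (String × String) :=
  (PySem.Dict.ofList (("action", tag) :: d)).items

-- ===== PORT A =====
def detect_folder_changes (old_folders : List (String × List (String × List (String × String)))) (new_folders : List (String × List (String × List (String × String)))) : List (String × List (String × List (String × List (String × String)))) :=
  let all_folders := PySem.Set.union (PySem.Set.ofList (old_folders.map Prod.fst)) (PySem.Set.ofList (new_folders.map Prod.fst))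
  let folders := all_folders.foldl (fun acc folder_name =>
    let old_folder := (PySem.Dict.mk old_folders).getD folder_name []
    let new_folder := (PySem.Dict.mk new_folders).getD folder_name []
    let all_files := PySem.Set.union (PySem.Set.ofList (old_folder.map Prod.fst)) (PySem.Set.ofList (new_folder.map Prod.fst))
    let folder_changes := all_files.foldl (fun fc filename =>
      let old_file_data := (PySem.Dict.mk old_folder).get? filename
      let new_file_data := (PySem.Dict.mk new_folder).get? filename
      if (PySem.Dict.mk old_folder).contains filename = false then
        fc.insert filename (pyActionMerge "create" (new_file_data.getD []))
      else if (PySem.Dict.mk new_folder).contains filename = false then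
        fc.insert filename [("action", "remove")]
      else if pyDictEq (old_file_data.getD []) (new_file_data.getD []) = false then
        fc.insert filename (pyActionMerge "update" (new_file_data.getD []))
      else fc)
      (PySem.Dict.empty : PySem.Dict String (List (String × String)))
    if folder_changes.items.isEmpty then acc else acc.insert folder_name folder_changes.items)
    (PySem.Dict.empty : PySem.Dict String (List (String × List (String × String))))
  [("folders", folders.items)]

-- ===== PORT B =====
def pvDiffFiles (old : List (String × List (String × String))) (new : List (String × List (String × String))) : List (String × List (String × String)) :=
  let fc := old.foldl (fun fc p =>
    match (PySem.Dict.mk new).get? p.1 with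
    | none => fc ++ [(p.1, [("action", "remove")])]
    | some nd =>
      if pyDictEq p.2 nd = false then fc ++ [(p.1, pyActionMerge "update" nd)]
      else fc) []
  new.foldl (fun fc p =>
    if (PySem.Dict.mk old).contains p.1 then fc else fc ++ [(p.1, pyActionMerge "create" p.2)]) fc

def detect_folder_changes_alt (old_folders : List (String × List (String × List (String × String)))) (new_folders : List (String × List (String × List (String × String)))) : List (String × List (String × List (String × List (String × String)))) :=
  let folders := old_folders.foldl (fun acc p =>
    let fc := pvDiffFiles p.2 ((PySem.Dict.mk new_folders).getD p.1 [])
    if fc.isEmpty then acc else acc ++ [(p.1, fc)]) []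
  let folders := new_folders.foldl (fun acc p =>
    if p.2.isEmpty || (PySem.Dict.mk old_folders).contains p.1 then acc
    else acc ++ [(p.1, p.2.map (fun q => (q.1, pyActionMerge "create" q.2)))]) folders
  [("folders", folders)]

-- ===== PRECONDITION & SPEC =====
-- Pre_ excludes association lists with duplicate folder names or duplicate file names inside a
-- folder: such lists do not represent any Python dict (A's arguments are dicts, whose keys are
-- unique), so each port's behaviour on them is an artefact of the list encoding.
def Pre_detect_folder_changes (old_folders : List (String × List (String × List (String × String)))) (new_folders : List (String × List (String × List (String × String)))) : Prop :=
  (old_folders.map Prod.fst).Nodup ∧ (new_folders.map Prod.fst).Nodup ∧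
  (∀ p ∈ old_folders, (p.2.map Prod.fst).Nodup) ∧ (∀ p ∈ new_folders, (p.2.map Prod.fst).Nodup)
instance (old_folders : List (String × List (String × List (String × String)))) (new_folders : List (String × List (String × List (String × String)))) : Decidable (Pre_detect_folder_changes old_folders new_folders) := by unfold Pre_detect_folder_changes; infer_instance

def pvWitness_detect_folder_changes : (List (String × List (String × List (String × String)))) × (List (String × List (String × List (String × String)))) :=
  ([("d1", [("f1", [("size", "3")]), ("f2", [("size", "4")])])],
   [("d1", [("f1", [("size", "9")])]), ("d2", [("f3", [])])])

def Spec_detect_folder_changes (old_folders : List (String × List (String × List (String × String)))) (new_folders : List (String × List (String × List (String × String)))) (out : List (String × List (String × List (String × List (String × String))))) : Prop := out = detect_folder_changes_alt old_folders new_folders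
instance (old_folders : List (String × List (String × List (String × String)))) (new_folders : List (String × List (String × List (String × String)))) (out : List (String × List (String × List (String × List (String × String))))) : Decidable (Spec_detect_folder_changes old_folders new_folders out) := by
  unfold Spec_detect_folder_changes
  haveI : DecidableEq (List (String × List (String × String))) := inferInstance
  haveI : DecidableEq (List (String × List (String × List (String × String)))) := inferInstance
  infer_instance

-- ===== CLAIM (what is proved, stated in full; the proofs are below) =====
def Claim_equal_detect_folder_changes : Prop := ∀ (old_folders : List (String × List (String × List (String × String)))) (new_folders : List (String × List (String × List (String × String)))), Dom_detect_folder_changes old_folders new_folders → Pre_detect_folder_changes old_folders new_folders → Spec_detect_folder_changes old_folders new_folders (detect_folder_changes old_folders new_folders)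

-- ===== LEMMAS AND PROOFS =====

-- dict-on-assoc-list mini-API
theorem mk_get?_of_mem {β : Type} {l : List (String × β)} {p : String × β}
    (hnd : (l.map Prod.fst).Nodup) (hp : p ∈ l) : (PySem.Dict.mk l).get? p.1 = some p.2 :=
  PySem.Dict.get?_of_mem_items _ hp hnd

theorem mk_get?_of_not_mem {β : Type} {l : List (String × β)} {k : String}
    (hk : k ∉ l.map Prod.fst) : (PySem.Dict.mk l).get? k = none :=
  (PySem.Dict.get?_eq_none_iff_not_mem_keys _ _).mpr hk

theorem mk_contains_true {β : Type} {l : List (String × β)} {k : String}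
    (hk : k ∈ l.map Prod.fst) : (PySem.Dict.mk l).contains k = true :=
  (PySem.Dict.contains_iff_mem_keys _ _).mpr hk

theorem mk_contains_false {β : Type} {l : List (String × β)} {k : String}
    (hk : k ∉ l.map Prod.fst) : (PySem.Dict.mk l).contains k = false := by
  cases h : (PySem.Dict.mk l).contains k
  · rfl
  · exact absurd ((PySem.Dict.contains_iff_mem_keys _ _).mp h) hk

theorem nodup_getD {β : Type} (l : List (String × List (String × β)))
    (hf : ∀ p ∈ l, (p.2.map Prod.fst).Nodup) (k : String) :
    ((((PySem.Dict.mk l).getD k [])).map Prod.fst).Nodup := by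
  rw [PySem.Dict.getD_eq_get?_getD]
  cases h : (PySem.Dict.mk l).get? k with
  | none => simp
  | some v =>
    have hv : (k, v) ∈ l := PySem.Dict.mem_items_of_get?_eq_some _ h
    simpa using hf (k, v) hv

-- B's append-or-skip loop is a filterMap
theorem foldl_optAppend {α γ : Type} (f : List γ → α → List γ) (g : α → Option γ)
    (hf : ∀ acc x, f acc x = match g x with | some e => acc ++ [e] | none => acc)
    (l : List α) (acc : List γ) : l.foldl f acc = acc ++ l.filterMap g := by
  induction l generalizing acc with
  | nil => simp
  | cons x t ih =>
    rw [List.foldl_cons, hf]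
    cases hg : g x <;> simp [hg, ih]

-- A's insert-or-skip dict loop over fresh distinct keys appends its hits
theorem items_foldl_optInsert {ν : Type} (f : PySem.Dict String ν → String → PySem.Dict String ν)
    (g : String → Option ν)
    (hf : ∀ d k, f d k = match g k with | some v => d.insert k v | none => d)
    (l : List String) (d : PySem.Dict String ν)
    (hfresh : ∀ k ∈ l, d.contains k = false) (hnd : l.Nodup) :
    (l.foldl f d).items = d.items ++ l.filterMap (fun k => (g k).map (fun v => (k, v))) := by
  induction l generalizing d with
  | nil => simp
  | cons x t ih =>
    have hx := hfresh x (by simp)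
    rw [List.foldl_cons, hf]
    cases hg : g x with
    | none =>
      rw [ih d (fun k hk => hfresh k (by simp [hk])) hnd.of_cons]
      simp [hg]
    | some v =>
      rw [ih (d.insert x v) ?_ hnd.of_cons]
      · rw [PySem.Dict.items_insert_of_not_contains d v hx]
        simp [hg]
      · intro k hk
        rw [PySem.Dict.contains_insert]
        have : k ≠ x := fun h => (List.nodup_cons.mp hnd).1 (h ▸ hk)
        simp [this, hfresh k (by simp [hk])]

theorem filterMap_filter_eq {β γ : Type} (l : List (String × β)) (q : String → Bool)
    (f : String → Option γ) (g : String × β → Option γ)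
    (hT : ∀ p ∈ l, q p.1 = true → f p.1 = g p)
    (hF : ∀ p ∈ l, q p.1 = false → g p = none) :
    (l.filter (fun p => q p.1)).filterMap (fun p => f p.1) = l.filterMap g := by
  induction l with
  | nil => simp
  | cons p t ih =>
    have ih' := ih (fun x hx => hT x (by simp [hx])) (fun x hx => hF x (by simp [hx]))
    cases hq : q p.1 with
    | true => simp [hq, List.filterMap_cons, ← hT p (by simp) hq, ih']
    | false => simp [hq, hF p (by simp) hq, ih']

-- the central bridge: A's pass over the key-union set = B's two passes
theorem union_filterMap {β γ : Type} (old new : List (String × β)) (hA : String → Option γ)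
    (hOld hNew : String × β → Option γ)
    (hndo : (old.map Prod.fst).Nodup) (hndn : (new.map Prod.fst).Nodup)
    (h1 : ∀ p ∈ old, hA p.1 = hOld p)
    (h2 : ∀ p ∈ new, p.1 ∉ old.map Prod.fst → hA p.1 = hNew p)
    (h3 : ∀ p ∈ new, p.1 ∈ old.map Prod.fst → hNew p = none) :
    (PySem.Set.union (PySem.Set.ofList (old.map Prod.fst)) (PySem.Set.ofList (new.map Prod.fst))).filterMap hA
      = old.filterMap hOld ++ new.filterMap hNew := by
  have e1 : PySem.Set.ofList (old.map Prod.fst) = old.map Prod.fst :=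
    PySem.Set.ofList_eq_self_of_nodup _ hndo
  have e2 : PySem.Set.ofList (new.map Prod.fst) = new.map Prod.fst :=
    PySem.Set.ofList_eq_self_of_nodup _ hndn
  show (PySem.Set.update _ _).filterMap hA = _
  rw [e1, e2, PySem.Set.update_eq_append_filter,
    PySem.Set.ofList_eq_self_of_nodup _ hndn, List.filterMap_append]
  congr 1
  · rw [List.filterMap_map]
    exact List.filterMap_congr h1
  · have heq : List.filter (fun y => !PySem.Set.contains (old.map Prod.fst) y) (new.map Prod.fst)
        = (List.filter ((fun y => !PySem.Set.contains (old.map Prod.fst) y) ∘ Prod.fst) new).map Prod.fst :=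
      List.filter_map
    rw [heq, List.filterMap_map]
    refine filterMap_filter_eq new (fun y => !PySem.Set.contains (old.map Prod.fst) y) hA hNew ?_ ?_
    · intro p hp hq
      refine h2 p hp (fun hmem => ?_)
      have hc : PySem.Set.contains (old.map Prod.fst) p.1 = true :=
        (PySem.Set.contains_iff _ _).mpr hmem
      simp only [] at hq
      rw [hc] at hq
      simp at hq
    · intro p hp hq
      have hc : PySem.Set.contains (old.map Prod.fst) p.1 = true := by
        simpa using hq
      exact h3 p hp ((PySem.Set.contains_iff _ _).mp hc)

-- A's per-file branch, as an Option-valued function of the filename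
def gAfile (ofd nfd : List (String × List (String × String))) (f : String) : Option (List (String × String)) :=
  if (PySem.Dict.mk ofd).contains f = false then
    some (pyActionMerge "create" (((PySem.Dict.mk nfd).get? f).getD []))
  else if (PySem.Dict.mk nfd).contains f = false then some [("action", "remove")]
  else if pyDictEq (((PySem.Dict.mk ofd).get? f).getD []) (((PySem.Dict.mk nfd).get? f).getD []) = false then
    some (pyActionMerge "update" (((PySem.Dict.mk nfd).get? f).getD []))
  else none

-- B's two per-file branches, as Option-valued functions of the (filename, data) pair
def gBold (nfd : List (String × List (String × String))) (p : String × List (String × String)) : Option (String × List (String × String)) :=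
  match (PySem.Dict.mk nfd).get? p.1 with
  | none => some (p.1, [("action", "remove")])
  | some nd =>
    if pyDictEq p.2 nd = false then some (p.1, pyActionMerge "update" nd)
    else none

def gBnew (ofd : List (String × List (String × String))) (p : String × List (String × String)) : Option (String × List (String × String)) :=
  if (PySem.Dict.mk ofd).contains p.1 then none else some (p.1, pyActionMerge "create" p.2)

theorem pvDiffFiles_eq_filterMap (ofd nfd : List (String × List (String × String))) :
    pvDiffFiles ofd nfd = ofd.filterMap (gBold nfd) ++ nfd.filterMap (gBnew ofd) := by
  unfold pvDiffFiles
  show List.foldl _ (List.foldl _ [] ofd) nfd = _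
  refine Eq.trans (foldl_optAppend _ (gBnew ofd) ?_ nfd _) (Eq.trans (congrArg (· ++ List.filterMap (gBnew ofd) nfd) (foldl_optAppend _ (gBold nfd) ?_ ofd [])) ?_)
  · intro acc p
    simp only [gBnew]
    split_ifs <;> rfl
  · intro acc p
    simp only [gBold]
    cases (PySem.Dict.mk nfd).get? p.1 <;> dsimp only <;> first | rfl | (split_ifs <;> rfl)
  · simp

-- A's inner (per-folder) dict-building loop produces exactly B's pvDiffFiles
theorem inner_items (ofd nfd : List (String × List (String × String)))
    (hno : (ofd.map Prod.fst).Nodup) (hnn : (nfd.map Prod.fst).Nodup) :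
    ((PySem.Set.union (PySem.Set.ofList (ofd.map Prod.fst)) (PySem.Set.ofList (nfd.map Prod.fst))).foldl
      (fun fc filename =>
        if (PySem.Dict.mk ofd).contains filename = false then
          fc.insert filename (pyActionMerge "create" ((((PySem.Dict.mk nfd).get? filename)).getD []))
        else if (PySem.Dict.mk nfd).contains filename = false then
          fc.insert filename [("action", "remove")]
        else if pyDictEq ((((PySem.Dict.mk ofd).get? filename)).getD []) ((((PySem.Dict.mk nfd).get? filename)).getD []) = false then
          fc.insert filename (pyActionMerge "update" ((((PySem.Dict.mk nfd).get? filename)).getD []))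
        else fc)
      (PySem.Dict.empty : PySem.Dict String (List (String × String)))).items
    = pvDiffFiles ofd nfd := by
  refine Eq.trans (items_foldl_optInsert _ (gAfile ofd nfd) ?_ _ _ (fun k _ => rfl)
    (PySem.Set.nodup_union _ _ (PySem.Set.nodup_ofList _))) ?_
  · intro d k
    simp only [gAfile]
    split_ifs <;> rfl
  rw [pvDiffFiles_eq_filterMap, show (PySem.Dict.empty : PySem.Dict String (List (String × String))).items = [] from rfl, List.nil_append]
  refine union_filterMap ofd nfd _ (gBold nfd) (gBnew ofd) hno hnn ?_ ?_ ?_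
  · intro p hp
    have hc : (PySem.Dict.mk ofd).contains p.1 = true := mk_contains_true (List.mem_map_of_mem hp)
    have hg : (PySem.Dict.mk ofd).get? p.1 = some p.2 := mk_get?_of_mem hno hp
    cases hn : (PySem.Dict.mk nfd).get? p.1 with
    | none =>
      have hc2 : (PySem.Dict.mk nfd).contains p.1 = false := by
        rw [PySem.Dict.contains_eq_isSome_get?, hn]; rfl
      simp [gAfile, gBold, hc, hc2, hn]
    | some v =>
      have hc2 : (PySem.Dict.mk nfd).contains p.1 = true := by
        rw [PySem.Dict.contains_eq_isSome_get?, hn]; rfl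
      simp [gAfile, gBold, hc, hc2, hg, hn]
  · intro p hp hnm
    have hc : (PySem.Dict.mk ofd).contains p.1 = false := mk_contains_false hnm
    have hg : (PySem.Dict.mk nfd).get? p.1 = some p.2 := mk_get?_of_mem hnn hp
    simp [gAfile, gBnew, hc, hg]
  · intro p hp hm
    have hc : (PySem.Dict.mk ofd).contains p.1 = true := mk_contains_true hm
    simp [gBnew, hc]

theorem pvDiffFiles_nil (nfd : List (String × List (String × String))) :
    pvDiffFiles [] nfd = nfd.map (fun q => (q.1, pyActionMerge "create" q.2)) := by
  rw [pvDiffFiles_eq_filterMap]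
  have hmem : ∀ p ∈ nfd, gBnew [] p = some (p.1, pyActionMerge "create" p.2) := by
    intro p _
    simp [gBnew, mk_contains_false (l := ([] : List (String × List (String × String)))) (by simp)]
  simp [List.filterMap_congr hmem]

-- A's per-folder branch, as an Option-valued function of the folder name
def gAfolder (o n : List (String × List (String × List (String × String)))) (name : String) :
    Option (List (String × List (String × String))) :=
  let ofd := (PySem.Dict.mk o).getD name []
  let nfd := (PySem.Dict.mk n).getD name []
  let fc := ((PySem.Set.union (PySem.Set.ofList (ofd.map Prod.fst)) (PySem.Set.ofList (nfd.map Prod.fst))).foldl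
      (fun fc filename =>
        if (PySem.Dict.mk ofd).contains filename = false then
          fc.insert filename (pyActionMerge "create" ((((PySem.Dict.mk nfd).get? filename)).getD []))
        else if (PySem.Dict.mk nfd).contains filename = false then
          fc.insert filename [("action", "remove")]
        else if pyDictEq ((((PySem.Dict.mk ofd).get? filename)).getD []) ((((PySem.Dict.mk nfd).get? filename)).getD []) = false then
          fc.insert filename (pyActionMerge "update" ((((PySem.Dict.mk nfd).get? filename)).getD []))
        else fc)
      (PySem.Dict.empty : PySem.Dict String (List (String × String))))
  if fc.items.isEmpty then none else some fc.items

-- B's two per-folder branches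
def gBoldF (n : List (String × List (String × List (String × String)))) (p : String × List (String × List (String × String))) :
    Option (String × List (String × List (String × String))) :=
  let fc := pvDiffFiles p.2 ((PySem.Dict.mk n).getD p.1 [])
  if fc.isEmpty then none else some (p.1, fc)

def gBnewF (o : List (String × List (String × List (String × String)))) (p : String × List (String × List (String × String))) :
    Option (String × List (String × List (String × String))) :=
  if p.2.isEmpty || (PySem.Dict.mk o).contains p.1 then none
  else some (p.1, p.2.map (fun q => (q.1, pyActionMerge "create" q.2)))

theorem detect_eq : ∀ (old_folders : List (String × List (String × List (String × String)))) (new_folders : List (String × List (String × List (String × String)))), Pre_detect_folder_changes old_folders new_folders → detect_folder_changes old_folders new_folders = detect_folder_changes_alt old_folders new_folders := by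
  intro o n hpre
  obtain ⟨hndo, hndn, hfo, hfn⟩ := hpre
  unfold detect_folder_changes detect_folder_changes_alt
  show [("folders", (List.foldl _ (PySem.Dict.empty : PySem.Dict String (List (String × List (String × String)))) _).items)]
    = [("folders", List.foldl _ (List.foldl _ [] o) n)]
  refine congrArg (fun x => [(("folders" : String), x)]) ?_
  refine Eq.trans (items_foldl_optInsert _ (gAfolder o n) ?_ _ _ (fun k _ => rfl)
    (PySem.Set.nodup_union _ _ (PySem.Set.nodup_ofList _))) ?_
  · intro d k
    simp only [gAfolder]
    split_ifs <;> rfl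
  refine Eq.trans ?_ (Eq.trans (congrArg (· ++ List.filterMap (gBnewF o) n) (foldl_optAppend _ (gBoldF n) ?_ o [])).symm (foldl_optAppend _ (gBnewF o) ?_ n _).symm)
  · rw [show (PySem.Dict.empty : PySem.Dict String (List (String × List (String × String)))).items = [] from rfl, List.nil_append, List.nil_append]
    refine union_filterMap o n _ (gBoldF n) (gBnewF o) hndo hndn ?_ ?_ ?_
    · intro p hp
      have hg : (PySem.Dict.mk o).getD p.1 [] = p.2 := by
        rw [PySem.Dict.getD_eq_get?_getD, mk_get?_of_mem hndo hp]; rfl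
      simp only [gAfolder, gBoldF, hg]
      rw [inner_items p.2 ((PySem.Dict.mk n).getD p.1 []) (by simpa using hfo p hp) (nodup_getD n hfn p.1)]
      split_ifs <;> rfl
    · intro p hp hnm
      have hg : (PySem.Dict.mk o).getD p.1 [] = [] := by
        rw [PySem.Dict.getD_eq_get?_getD, mk_get?_of_not_mem hnm]; rfl
      have hgn : (PySem.Dict.mk n).getD p.1 [] = p.2 := by
        rw [PySem.Dict.getD_eq_get?_getD, mk_get?_of_mem hndn hp]; rfl
      have hc : (PySem.Dict.mk o).contains p.1 = false := mk_contains_false hnm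
      simp only [gAfolder, gBnewF, hg, hgn, hc, Bool.or_false]
      rw [inner_items [] p.2 (by simp) (by simpa using hfn p hp)]
      rw [pvDiffFiles_nil]
      by_cases he : p.2.isEmpty
      · simp [he]
      · simp [he]
    · intro p hp hm
      have hc : (PySem.Dict.mk o).contains p.1 = true := mk_contains_true hm
      simp [gBnewF, hc]
  · intro acc p
    simp only [gBoldF]
    split_ifs <;> rfl
  · intro acc p
    simp only [gBnewF]
    split_ifs <;> rfl

-- ===== VERDICT (by name: the statement is the Claim_ definition above) =====
theorem detect_folder_changes_spec : Claim_equal_detect_folder_changes := by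
  intro o n _ hpre
  unfold Spec_detect_folder_changes
  exact detect_eq o n hpre
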